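-- pv_equiv track=rewrite | github.com/Han-16/Algorithm | 프로그래머스/unrated/155652. 둘만의 암호/둘만의 암호.py | solution
-- ===== SOURCE A (Python) =====
-- def solution(s, skip, index):
--     decoding = []
--     skip = [ord(i) for i in skip]
--     s = [ord(i) for i in s]
--
--     for i in range(len(s)):
--         cnt = 0
--         num = s[i]
--         while cnt < index:
--             if num == ord('z'):
--                 num = ord('a') - 1
--             if num + 1 in skip:
--                 num += 1
--             else:
--                 num += 1
--                 cnt += 1
--         decoding.append(num)
--     return ''.join(list(map(chr, decoding)))
-- ===== SOURCE B (Python) =====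
-- def solution(s, skip, index):
--     # Closed form per character: the shifted letter is either picked directly
--     # from the free (non-skip) code points between the character and 'z', or,
--     # past 'z', found by indexing the allowed lowercase alphabet modularly.
--     # O(len(s) + 26) membership work instead of O(len(s) * index * len(skip)).
--     if index <= 0:
--         return s
--     skipset = set(map(ord, skip))
--     allowed = [v for v in range(97, 123) if v not in skipset]
--     out = []
--     for ch in s:
--         seg = [v for v in range(ord(ch) + 1, 123) if v not in skipset]
--         if index <= len(seg):
--             out.append(seg[index - 1])
--         else:
--             out.append(allowed[(index - len(seg) - 1) % len(allowed)])
--     return ''.join(map(chr, out))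
-- ===== Notes on version B (the rewrite author's own statement) =====
-- stated objective: faster
-- what changed: Replaces the per-character while-loop that steps one code point at a time (index iterations with a list-membership scan each) by a closed form: count the free (non-skip) code points between the character and 'z' and otherwise index the precomputed allowed lowercase alphabet with modular arithmetic; Pre_ excludes inputs on which A's loop never terminates and inputs containing characters above 'z' with a positive index, which lie outside the cipher's lowercase domain and where A's no-wrap stepping is an accident of its implementation.
-- outside the precondition, e.g. on solution('{', 'a', 1): A returns '|', B returns 'b'
import Mathlib
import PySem

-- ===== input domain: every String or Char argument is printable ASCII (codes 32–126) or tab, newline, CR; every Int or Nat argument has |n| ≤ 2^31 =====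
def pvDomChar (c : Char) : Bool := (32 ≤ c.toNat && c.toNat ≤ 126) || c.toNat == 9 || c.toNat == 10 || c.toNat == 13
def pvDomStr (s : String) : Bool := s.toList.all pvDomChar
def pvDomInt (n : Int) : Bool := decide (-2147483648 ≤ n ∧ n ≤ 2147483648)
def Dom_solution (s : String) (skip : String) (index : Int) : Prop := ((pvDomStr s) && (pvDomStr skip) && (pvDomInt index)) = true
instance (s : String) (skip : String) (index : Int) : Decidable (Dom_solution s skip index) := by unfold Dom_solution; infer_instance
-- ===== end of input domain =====

-- B replaces A's per-character stepping loop (index iterations each) by a closed form over the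
-- free code points above the character plus modular indexing of the allowed lowercase alphabet.

-- ===== PORT A =====
-- chr(n), ported by hand; exact for every valid unicode scalar value
-- (Pre_solution keeps all produced codes there); ord(ch) is (ch.toNat : Int), exact for every Char
def pvChr (n : Int) : Char := Char.ofNat n.toNat

-- the 'while cnt < index' loop; fuel only makes it total, Pre_solution guarantees it suffices
def solutionLoop (skipL : List Int) (index : Int) : Nat → Int → Int → Int
  | 0, num, _ => num
  | fuel+1, num, cnt =>
    if cnt < index then
      let num1 := if num = 122 then 96 else num
      if (num1 + 1) ∈ skipL then solutionLoop skipL index fuel (num1 + 1) cnt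
      else solutionLoop skipL index fuel (num1 + 1) (cnt + 1)
    else num

def solution (s : String) (skip : String) (index : Int) : String :=
  let skipL : List Int := skip.toList.map (fun c => (c.toNat : Int))
  let sL : List Int := s.toList.map (fun c => (c.toNat : Int))
  let decoding : List Int :=
    sL.foldl (fun acc num => acc ++ [solutionLoop skipL index (index.toNat * 152) num 0]) []
  String.ofList (decoding.map pvChr)

-- ===== PORT B =====
def solution_alt (s : String) (skip : String) (index : Int) : String :=
  if index ≤ 0 then s else
  let skipset : PySem.Set Int := PySem.Set.ofList (skip.toList.map (fun c => (c.toNat : Int)))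
  let allowed : List Int :=
    (PySem.List.pyRange 97 123 1).filter (fun v => !(PySem.Set.contains skipset v))
  let out : List Int := s.toList.foldl (fun acc ch =>
    let seg := (PySem.List.pyRange ((ch.toNat : Int) + 1) 123 1).filter
      (fun v => !(PySem.Set.contains skipset v))
    acc ++ [
      if index ≤ (seg.length : Int) then PySem.List.pyGetD seg (index - 1) 0
      else PySem.List.pyGetD allowed
             (PySem.Int.mod (index - (seg.length : Int) - 1) (allowed.length : Int)) 0]) []
  String.ofList (out.map pvChr)

-- ===== PRECONDITION & SPEC =====
-- Pre_solution excludes (1) inputs on which A's while-loop never terminates (positive index and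
-- no free lowercase letter left to count), and (2) inputs containing characters above 'z'
-- together with a positive index: those are outside the cipher's lowercase domain, and A's
-- no-wrap stepping past 'z' there is an accident of its implementation.
def Pre_solution (s : String) (skip : String) (index : Int) : Prop :=
  ((index ≤ 0)
    ∨ (∃ v ∈ PySem.List.pyRange 97 123 1, v ∉ skip.toList.map (fun c => (c.toNat : Int)))
    ∨ (∀ c ∈ s.toList, (c.toNat : Int) ≤ 122 →
        index ≤ ((((PySem.List.pyRange ((c.toNat : Int) + 1) 123 1).filter
          (fun v => decide (v ∉ skip.toList.map (fun c => (c.toNat : Int))))).length : Int))))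
  ∧ ((index ≤ 0) ∨ (∀ c ∈ s.toList, c.toNat ≤ 122))
instance (s : String) (skip : String) (index : Int) : Decidable (Pre_solution s skip index) := by
  unfold Pre_solution; infer_instance

def pvWitness_solution : String × String × Int := ("hello", "xz", 0)

def Spec_solution (s : String) (skip : String) (index : Int) (out : String) : Prop := out = solution_alt s skip index
instance (s : String) (skip : String) (index : Int) (out : String) : Decidable (Spec_solution s skip index out) := by unfold Spec_solution; infer_instance

-- ===== CLAIM (what is proved, stated in full; the proofs are below) =====
def Claim_equal_solution : Prop := ∀ (s : String) (skip : String) (index : Int), Dom_solution s skip index → Pre_solution s skip index → Spec_solution s skip index (solution s skip index)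

-- ===== LEMMAS AND PROOFS =====

-- the free (non-skip) code points strictly between c and b, ascending
def pvSeg (L : List Int) (b c : Int) : List Int :=
  (PySem.List.pyRange (c + 1) b 1).filter (fun v => decide (v ∉ L))

def pvAllowed (L : List Int) : List Int := pvSeg L 123 96

-- B's value for a char c ≤ 122 (with n = index)
def pvFlowLow (L : List Int) (c n : Int) : Int :=
  if n ≤ ((pvSeg L 123 c).length : Int) then PySem.List.pyGetD (pvSeg L 123 c) (n - 1) 0
  else PySem.List.pyGetD (pvAllowed L)
         (PySem.Int.mod (n - ((pvSeg L 123 c).length : Int) - 1) ((pvAllowed L).length : Int)) 0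

lemma loop_stop (L : List Int) (index : Int) (fuel : Nat) (num cnt : Int) (h : index ≤ cnt) :
    solutionLoop L index fuel num cnt = num := by
  cases fuel <;> simp [solutionLoop, not_lt.2 h]

lemma seg_nil_iff (L : List Int) (b c : Int) :
    pvSeg L b c = [] ↔ ∀ w, c < w → w < b → w ∈ L := by
  unfold pvSeg
  rw [List.filter_eq_nil_iff]
  constructor
  · intro h w h1 h2
    have := h w (by rw [PySem.List.mem_pyRange_one]; omega)
    simpa using this
  · intro h w hw
    simp only [PySem.List.mem_pyRange_one] at hw
    simpa using h w (by omega) (by omega)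

lemma seg_head (L : List Int) (b c v : Int) (rest : List Int)
    (h : pvSeg L b c = v :: rest) :
    c < v ∧ v < b ∧ v ∉ L ∧ (∀ w, c < w → w < v → w ∈ L) ∧ rest = pvSeg L b v := by
  suffices H : ∀ (d : Nat) (c v : Int) (rest : List Int), (b - (c+1)).toNat ≤ d →
      pvSeg L b c = v :: rest →
      c < v ∧ v < b ∧ v ∉ L ∧ (∀ w, c < w → w < v → w ∈ L) ∧ rest = pvSeg L b v by
    exact H (b - (c+1)).toNat c v rest le_rfl h
  intro d
  induction d with
  | zero =>
    intro c v rest hd h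
    exfalso
    have hnil : PySem.List.pyRange (c+1) b 1 = [] := PySem.List.pyRange_one_eq_nil (by omega)
    unfold pvSeg at h
    rw [hnil] at h
    simp at h
  | succ d ih =>
    intro c v rest hd h
    by_cases hb : b ≤ c + 1
    · exfalso
      have hnil : PySem.List.pyRange (c+1) b 1 = [] := PySem.List.pyRange_one_eq_nil hb
      unfold pvSeg at h
      rw [hnil] at h
      simp at h
    · have hcons := PySem.List.pyRange_one_cons (a := c+1) (b := b) (by omega)
      unfold pvSeg at h
      rw [hcons, List.filter_cons] at h
      by_cases hmem : (c+1) ∈ L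
      · rw [if_neg (by simpa using hmem)] at h
        have hrec := ih (c+1) v rest (by omega) h
        obtain ⟨h1, h2, h3, h4, h5⟩ := hrec
        refine ⟨by omega, h2, h3, ?_, h5⟩
        intro w hw1 hw2
        rcases eq_or_lt_of_le (show c + 1 ≤ w by omega) with heq | hlt
        · rwa [← heq]
        · exact h4 w hlt hw2
      · rw [if_pos (by simpa using hmem)] at h
        rw [List.cons_eq_cons] at h
        obtain ⟨rfl, rfl⟩ := h
        exact ⟨by omega, by omega, hmem, by intro w h1 h2; omega, rfl⟩

-- one counted step along an ascending run: c+1,…,c+j-1 ∈ L, c+j ∉ L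
lemma asc_run (L : List Int) (index : Int) :
    ∀ (j : Nat) (c cnt : Int) (fuel : Nat), 1 ≤ j →
    (∀ i : Int, 0 ≤ i → i < (j : Int) → c + i ≠ 122) →
    (∀ w, c < w → w < c + (j : Int) → w ∈ L) →
    (c + (j : Int)) ∉ L →
    cnt < index → j ≤ fuel →
    solutionLoop L index fuel c cnt = solutionLoop L index (fuel - j) (c + (j : Int)) (cnt + 1) := by
  intro j
  induction j with
  | zero => intro c cnt fuel h1; omega
  | succ j ih =>
    intro c cnt fuel h1 hno hbet hfree hcnt hfuel
    obtain ⟨f, rfl⟩ : ∃ f, fuel = f + 1 := ⟨fuel - 1, by omega⟩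
    have hc122 : c ≠ 122 := by
      have := hno 0 le_rfl (by push_cast; omega)
      simpa using this
    show solutionLoop L index (f+1) c cnt = _
    rw [solutionLoop, if_pos hcnt]
    simp only [if_neg hc122]
    by_cases hm : (c + 1) ∈ L
    · have hj1 : 1 ≤ j := by
        by_contra hj0
        have hj : j = 0 := by omega
        subst hj
        exact hfree (by push_cast at hm ⊢; simpa using hm)
      rw [if_pos hm]
      have := ih (c+1) cnt f hj1
        (by intro i hi1 hi2; have := hno (i+1) (by omega) (by push_cast at hi2 ⊢; omega); omega)
        (by intro w hw1 hw2; exact hbet w (by omega) (by push_cast at hw2 ⊢; omega))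
        (by have harg : c + 1 + (j:Int) = c + ((j+1 : Nat) : Int) := by push_cast; ring
            rw [harg]; exact hfree)
        hcnt (by omega)
      rw [this]
      congr 1 <;> omega
    · have hj0 : j = 0 := by
        by_contra hj
        exact hm (hbet (c+1) (by omega) (by push_cast; omega))
      subst hj0
      rw [if_neg hm]
      congr 1 <;> omega

-- an uncounted run: c+1,…,c+j ∈ L
lemma unc_run (L : List Int) (index : Int) :
    ∀ (j : Nat) (c cnt : Int) (fuel : Nat),
    (∀ i : Int, 0 ≤ i → i < (j : Int) → c + i ≠ 122) →
    (∀ w, c < w → w ≤ c + (j : Int) → w ∈ L) →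
    cnt < index → j ≤ fuel →
    solutionLoop L index fuel c cnt = solutionLoop L index (fuel - j) (c + (j : Int)) cnt := by
  intro j
  induction j with
  | zero =>
    intro c cnt fuel _ _ _ _
    congr 1 <;> omega
  | succ j ih =>
    intro c cnt fuel hno hin hcnt hfuel
    obtain ⟨f, rfl⟩ : ∃ f, fuel = f + 1 := ⟨fuel - 1, by omega⟩
    have hc122 : c ≠ 122 := by
      have := hno 0 le_rfl (by push_cast; omega)
      simpa using this
    have hm : (c + 1) ∈ L := hin (c+1) (by omega) (by push_cast; omega)
    show solutionLoop L index (f+1) c cnt = _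
    rw [solutionLoop, if_pos hcnt]
    simp only [if_neg hc122]
    rw [if_pos hm]
    have := ih (c+1) cnt f
      (by intro i hi1 hi2; have := hno (i+1) (by omega) (by push_cast at hi2 ⊢; omega); omega)
      (by intro w hw1 hw2; exact hin w (by omega) (by push_cast at hw2 ⊢; omega))
      hcnt (by omega)
    rw [this]
    congr 1 <;> omega

-- one counted step from a char ≤ 122
lemma next_low (L : List Int) (index : Int) (c cnt : Int) (fuel : Nat)
    (hc0 : 0 ≤ c) (hc1 : c ≤ 122)
    (hA : pvAllowed L ≠ [] ∨ 1 ≤ ((pvSeg L 123 c).length : Int))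
    (hcnt : cnt < index) (hfuel : 152 ≤ fuel) :
    ∃ (v : Int) (f' : Nat), fuel ≤ f' + 152 ∧
      solutionLoop L index fuel c cnt = solutionLoop L index f' v (cnt + 1) ∧
      0 ≤ v ∧ v ≤ 122 ∧
      ((pvSeg L 123 c = v :: pvSeg L 123 v) ∨
       (pvSeg L 123 c = [] ∧ pvAllowed L = v :: pvSeg L 123 v)) := by
  cases hseg : pvSeg L 123 c with
  | nil =>
    have hAll : pvAllowed L ≠ [] := by
      rcases hA with h | h
      · exact h
      · rw [hseg] at h; simp at h
    obtain ⟨a, rest', hall⟩ : ∃ a rest', pvAllowed L = a :: rest' := by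
      cases hl : pvAllowed L with
      | nil => exact absurd hl hAll
      | cons a r => exact ⟨a, r, rfl⟩
    obtain ⟨ha1, ha2, ha3, ha4, ha5⟩ := seg_head L 123 96 a rest' hall
    have hin : ∀ w, c < w → w < 123 → w ∈ L := (seg_nil_iff L 123 c).1 hseg
    have hrun := unc_run L index (122 - c).toNat c cnt fuel
      (by intro i hi1 hi2; omega)
      (by intro w hw1 hw2; exact hin w hw1 (by omega))
      hcnt (by omega)
    have hc122 : c + (((122 - c).toNat : Nat) : Int) = 122 := by omega
    rw [hc122] at hrun
    obtain ⟨f2, hf2⟩ : ∃ f2, fuel - (122 - c).toNat = f2 + 1 := ⟨fuel - (122-c).toNat - 1, by omega⟩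
    rw [hf2] at hrun
    have hstep : solutionLoop L index (f2+1) 122 cnt =
        (if (97:Int) ∈ L then solutionLoop L index f2 97 cnt
         else solutionLoop L index f2 97 (cnt+1)) := by
      show solutionLoop L index (f2+1) 122 cnt = _
      rw [solutionLoop, if_pos hcnt]
      norm_num
    by_cases h97 : a = 97
    · have h97f : (97:Int) ∉ L := h97 ▸ ha3
      refine ⟨a, f2, by omega, ?_, by omega, by omega,
        Or.inr ⟨rfl, by rw [hall, ha5, h97]⟩⟩
      rw [hrun, hstep, if_neg h97f, h97]
    · have h97in : (97:Int) ∈ L := ha4 97 (by omega) (by omega)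
      have hasc := asc_run L index (a - 97).toNat 97 cnt f2
        (by omega)
        (by intro i hi1 hi2; omega)
        (by intro w hw1 hw2; exact ha4 w (by omega) (by omega))
        (by have he : (97:Int) + (((a - 97).toNat : Nat) : Int) = a := by omega
            rw [he]; exact ha3)
        hcnt (by omega)
      have ha97 : (97:Int) + (((a - 97).toNat : Nat) : Int) = a := by omega
      rw [ha97] at hasc
      refine ⟨a, f2 - (a-97).toNat, by omega, ?_, by omega, by omega,
        Or.inr ⟨rfl, by rw [hall, ha5]⟩⟩
      rw [hrun, hstep, if_pos h97in, hasc]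
  | cons v rest =>
    obtain ⟨h1, h2, h3, h4, h5⟩ := seg_head L 123 c v rest hseg
    have hasc := asc_run L index (v - c).toNat c cnt fuel
      (by omega)
      (by intro i hi1 hi2; omega)
      (by intro w hw1 hw2; exact h4 w hw1 (by omega))
      (by have he : c + (((v - c).toNat : Nat) : Int) = v := by omega
          rw [he]; exact h3)
      hcnt (by omega)
    have hvc : c + (((v - c).toNat : Nat) : Int) = v := by omega
    rw [hvc] at hasc
    exact ⟨v, fuel - (v-c).toNat, by omega, hasc, by omega, by omega,
      Or.inl (by rw [h5])⟩

lemma cons_getElem_shift {α : Type} (x : α) (xs : List α) (i j : Nat)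
    (hij : i = j + 1) (hi : i < (x :: xs).length) (hj : j < xs.length) :
    (x :: xs)[i] = xs[j] := by
  subst hij; simp

lemma flowA2 (L : List Int) (c v n : Int) (h : pvSeg L 123 c = v :: pvSeg L 123 v) (hn : 2 ≤ n) :
    pvFlowLow L c n = pvFlowLow L v (n - 1) := by
  have hlen : ((pvSeg L 123 c).length : Int) = ((pvSeg L 123 v).length : Int) + 1 := by
    rw [h]; simp
  unfold pvFlowLow
  by_cases hb : n ≤ ((pvSeg L 123 v).length : Int) + 1
  · rw [if_pos (by rw [hlen]; exact hb), if_pos (by omega)]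
    rw [h]
    rw [PySem.List.pyGetD_eq_getElem _ _ (by omega) (by simp; omega),
        PySem.List.pyGetD_eq_getElem _ _ (by omega) (by omega)]
    exact cons_getElem_shift _ _ _ _ (by omega) _ _
  · rw [if_neg (by rw [hlen]; omega), if_neg (by omega)]
    have he : n - ((pvSeg L 123 c).length : Int) - 1
        = n - 1 - ((pvSeg L 123 v).length : Int) - 1 := by omega
    rw [he]

lemma flowB2 (L : List Int) (c v n : Int) (h0 : pvSeg L 123 c = [])
    (h : pvAllowed L = v :: pvSeg L 123 v) (hn : 2 ≤ n) :
    pvFlowLow L c n = pvFlowLow L v (n - 1) := by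
  have hm : (0:Int) < ((pvAllowed L).length : Int) := by rw [h]; simp
  have hk : ((pvSeg L 123 c).length : Int) = 0 := by rw [h0]; simp
  have hkv : ((pvAllowed L).length : Int) = ((pvSeg L 123 v).length : Int) + 1 := by
    rw [h]; simp
  unfold pvFlowLow
  rw [if_neg (by rw [hk]; omega)]
  by_cases hb : n - 1 ≤ ((pvSeg L 123 v).length : Int)
  · rw [if_pos hb]
    have harg : PySem.Int.mod (n - ((pvSeg L 123 c).length : Int) - 1) ((pvAllowed L).length : Int)
        = n - 1 := by
      rw [hk, PySem.Int.mod_eq_emod_of_pos hm]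
      simp only [sub_zero]
      exact Int.emod_eq_of_lt (by omega) (by omega)
    rw [harg, h]
    rw [PySem.List.pyGetD_eq_getElem _ _ (by omega) (by simp; omega),
        PySem.List.pyGetD_eq_getElem _ _ (by omega) (by omega)]
    exact cons_getElem_shift _ _ _ _ (by omega) _ _
  · rw [if_neg hb]
    congr 1
    rw [hk, PySem.Int.mod_eq_emod_of_pos hm, PySem.Int.mod_eq_emod_of_pos hm]
    have he : n - 1 - ((pvSeg L 123 v).length : Int) - 1
        = (n - 0 - 1) - ((pvAllowed L).length : Int) := by omega
    rw [he, Int.sub_emod_right]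

lemma flow1 (L : List Int) (c v : Int)
    (h : pvSeg L 123 c = v :: pvSeg L 123 v ∨
         (pvSeg L 123 c = [] ∧ pvAllowed L = v :: pvSeg L 123 v)) :
    pvFlowLow L c 1 = v := by
  rcases h with hA | ⟨h0, hB⟩
  · unfold pvFlowLow
    rw [hA]
    rw [if_pos (by simp <;> omega)]
    norm_num [PySem.List.pyGetD_zero_cons]
  · have hm : (0:Int) < ((pvAllowed L).length : Int) := by rw [hB]; simp
    unfold pvFlowLow
    rw [h0]
    rw [if_neg (by simp)]
    have harg : PySem.Int.mod (1 - (([] : List Int).length : Int) - 1) ((pvAllowed L).length : Int)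
        = 0 := by
      rw [PySem.Int.mod_eq_emod_of_pos hm]
      norm_num
    rw [harg, hB, PySem.List.pyGetD_zero_cons]

lemma main_low (L : List Int) (index : Int) :
    ∀ (n : Nat) (c cnt : Int) (fuel : Nat), 1 ≤ n → 0 ≤ c → c ≤ 122 →
    (pvAllowed L ≠ [] ∨ (n : Int) ≤ ((pvSeg L 123 c).length : Int)) →
    cnt + (n : Int) = index → n * 152 ≤ fuel →
    solutionLoop L index fuel c cnt = pvFlowLow L c (n : Int) := by
  intro n
  induction n with
  | zero => intro c cnt fuel h1; omega
  | succ n ih =>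
    intro c cnt fuel h1 hc0 hc1 hA hcnt hfuel
    have hlt : cnt < index := by push_cast at hcnt; omega
    obtain ⟨v, f', hf, heq, hv0, hv1, hcase⟩ := next_low L index c cnt fuel hc0 hc1
      (by rcases hA with h | h
          · exact Or.inl h
          · right; push_cast at h; omega)
      hlt (by omega)
    rw [heq]
    by_cases hn : n = 0
    · subst hn
      rw [loop_stop L index f' v (cnt+1) (by push_cast at hcnt; omega)]
      have he : (((0:Nat)+1 : Nat) : Int) = 1 := by norm_num
      rw [he]
      exact (flow1 L c v hcase).symm
    · have hn1 : 1 ≤ n := by omega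
      have hstep : pvAllowed L ≠ [] ∨ (n : Int) ≤ ((pvSeg L 123 v).length : Int) := by
        rcases hcase with hA' | ⟨h0, hB⟩
        · rcases hA with h | h
          · exact Or.inl h
          · right
            rw [hA'] at h
            simp only [List.length_cons] at h
            push_cast at h ⊢
            omega
        · exact Or.inl (by rw [hB]; simp)
      rw [ih v (cnt+1) f' hn1 hv0 hv1 hstep (by push_cast at hcnt ⊢; omega) (by omega)]
      rcases hcase with hA' | ⟨h0, hB⟩
      · rw [flowA2 L c v (((n+1 : Nat)) : Int) hA' (by push_cast; omega)]
        congr 1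
        push_cast; ring
      · rw [flowB2 L c v (((n+1 : Nat)) : Int) h0 hB (by push_cast; omega)]
        congr 1
        push_cast; ring

-- the Bool test B's port makes on its set is the plain non-membership test
lemma filter_contains_eq (L : List Int) (a b : Int) :
    (PySem.List.pyRange a b 1).filter
        (fun v => !(PySem.Set.contains (PySem.Set.ofList L) v))
      = (PySem.List.pyRange a b 1).filter (fun v => decide (v ∉ L)) := by
  apply List.filter_congr
  intro v _
  by_cases hv : v ∈ L
  · simp [hv, PySem.Set.contains, PySem.Set.mem_ofList]
  · simp [hv, PySem.Set.contains, PySem.Set.mem_ofList]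

lemma allowed_eq (L : List Int) :
    (PySem.List.pyRange 97 123 1).filter (fun v => decide (v ∉ L)) = pvAllowed L := by
  unfold pvAllowed pvSeg
  norm_num

-- ===== VERDICT (by name: the statement is the Claim_ definition above) =====
set_option maxRecDepth 8000 in
theorem solution_spec : Claim_equal_solution := by
  intro s skip index hDom hPre
  unfold Spec_solution
  obtain ⟨hPre1, hPre2⟩ := hPre
  unfold solution solution_alt
  dsimp only
  by_cases hidx : index ≤ 0
  · rw [if_pos hidx]
    have hfuel : index.toNat * 152 = 0 := by omega
    rw [hfuel, PySem.List.foldl_append_singleton_eq_map]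
    simp only [solutionLoop, List.nil_append, List.map_map]
    have hmap : List.map (pvChr ∘ (fun num : Int => num) ∘ fun c : Char => (c.toNat : Int)) s.toList
        = s.toList := by
      apply (List.map_congr_left ?_).trans (List.map_id _)
      intro c _
      simp [pvChr, Char.ofNat_toNat]
    rw [hmap, String.ofList_toList]
  · rw [if_neg hidx]
    have hs122 : ∀ c ∈ s.toList, c.toNat ≤ 122 := by
      rcases hPre2 with h | h
      · omega
      · exact h
    rw [PySem.List.foldl_append_singleton_eq_map, PySem.List.foldl_append_singleton_eq_map]
    simp only [List.nil_append, List.map_map]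
    congr 1
    apply List.map_congr_left
    intro ch hch
    simp only [Function.comp]
    congr 1
    rw [filter_contains_eq, filter_contains_eq, allowed_eq]
    have hc0 : (0:Int) ≤ (ch.toNat : Int) := by positivity
    have hc1 : (ch.toNat : Int) ≤ 122 := by exact_mod_cast hs122 ch hch
    have hn1 : 1 ≤ index.toNat := by omega
    have hcast : ((index.toNat : Nat) : Int) = index := by omega
    have hA : pvAllowed (skip.toList.map (fun c => (c.toNat : Int))) ≠ [] ∨
        ((index.toNat : Nat) : Int) ≤
          ((pvSeg (skip.toList.map (fun c => (c.toNat : Int))) 123 (ch.toNat : Int)).length : Int) := by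
      rcases hPre1 with h | h | h
      · omega
      · left
        obtain ⟨v, hv1, hv2⟩ := h
        have hvmem : v ∈ pvAllowed (skip.toList.map (fun c => (c.toNat : Int))) := by
          rw [← allowed_eq]
          exact List.mem_filter.2 ⟨hv1, by simpa using hv2⟩
        exact List.ne_nil_of_mem hvmem
      · right
        rw [hcast]
        exact h ch hch hc1
    have hml := main_low (skip.toList.map (fun c => (c.toNat : Int))) index index.toNat
      (ch.toNat : Int) 0 (index.toNat * 152) hn1 hc0 hc1 hA (by omega) le_rfl
    rw [hml, hcast]
    unfold pvFlowLow pvSeg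
    rfl
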